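-- pv_equiv track=rewrite | github.com/dost4/advent_of_code | 2022_day20.py | perform_op
-- ===== SOURCE A (Python) =====
-- def perform_op(input_l, seen, i):
-- 	op, original_op = input_l[i], input_l[i]
-- 	while op <= -5000:
-- 		op += 4999
--
-- 	if op == 0:
-- 		seen[i] = 1
-- 	elif op > 0:
-- 		if op >= 5000:
-- 			plus = op // 5000
-- 			op = op % 5000
-- 			op += plus
--
-- 		if op + i >= len(input_l) :
-- 			#wrap around
-- 			end_elements = len(input_l) - i -1
-- 			begining_index = op - end_elements
-- 			el = input_l.pop(i)
-- 			seen.pop(i)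
--
-- 			input_l.insert(begining_index, el)
-- 			seen.insert(begining_index, 1)
--
-- 		else:
-- 			el = input_l.pop(i)
-- 			seen.pop(i)
-- 			input_l.insert(op+i, el)
-- 			seen.insert(op+i, 1)
--
-- 	else:
-- 		#negatives
--
-- 		if op + i <= 0:
-- 			#wrap around
-- 			begining_elements = i
-- 			end_index = op + begining_elements
-- 			el = input_l.pop(i)
-- 			seen.pop(i)
-- 			if end_index == 0:
-- 				end_index = len(input_l)
-- 				input_l.insert(end_index, el)
-- 				seen.insert(end_index, 1)
-- 			else:
-- 				input_l.insert(end_index, el)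
-- 				seen.insert(end_index, 1)
--
-- 		else:
-- 			el = input_l.pop(i)
-- 			seen.pop(i)
-- 			input_l.insert(i+op, el)
-- 			seen.insert(i+op, 1)
--
-- 	return input_l, seen, i
-- ===== SOURCE B (Python) =====
-- def perform_op(input_l, seen, i):
--     op = input_l[i]
--     if op <= -5000:
--         # closed form for the repeated "+= 4999" reduction
--         op += 4999 * ((-5000 - op) // 4999 + 1)
--     if op == 0:
--         seen[i] = 1
--         return input_l, seen, i
--     if op >= 5000:
--         op = op % 5000 + op // 5000
--     n = len(input_l)
--     dest = op + i
--     if op > 0 and dest >= n: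
--         dest = dest + 1 - n
--     elif op < 0 and dest == 0:
--         dest = n - 1
--     el = input_l.pop(i)
--     seen.pop(i)
--     input_l.insert(dest, el)
--     seen.insert(dest, 1)
--     return input_l, seen, i
-- ===== Notes on version B (the rewrite author's own statement) =====
-- stated objective: simpler
-- what changed: B replaces A's repeated 'op += 4999' while-loop with one closed-form floor-division computation of the reduction, and collapses A's four separate pop/insert branches into a single pop/insert at a destination index computed up front.
import Mathlib
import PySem

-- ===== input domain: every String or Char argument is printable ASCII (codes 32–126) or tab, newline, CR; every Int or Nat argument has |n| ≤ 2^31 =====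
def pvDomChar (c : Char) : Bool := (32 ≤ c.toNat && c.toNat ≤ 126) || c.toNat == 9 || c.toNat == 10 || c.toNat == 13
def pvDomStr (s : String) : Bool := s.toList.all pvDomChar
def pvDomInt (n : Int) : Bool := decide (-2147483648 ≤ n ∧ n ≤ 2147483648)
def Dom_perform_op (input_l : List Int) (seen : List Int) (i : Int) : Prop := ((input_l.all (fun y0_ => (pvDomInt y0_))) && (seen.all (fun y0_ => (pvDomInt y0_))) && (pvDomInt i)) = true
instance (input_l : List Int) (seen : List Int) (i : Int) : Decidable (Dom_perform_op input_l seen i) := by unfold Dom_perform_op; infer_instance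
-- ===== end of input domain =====

-- B replaces A's repeated "op += 4999" while-loop with closed-form arithmetic and merges
-- A's four pop/insert branches into one pop/insert with a computed destination (simpler).
-- Equivalence is about the RETURN value; Python A mutates input_l and seen in place (B performs the same mutation).

-- ===== PORT A =====
-- A's "while op <= -5000: op += 4999" loop, transliterated as recursion
def performOpWhileA (op : Int) : Int :=
  if op ≤ -5000 then performOpWhileA (op + 4999) else op
  termination_by (-op).toNat
  decreasing_by omega

def perform_op (input_l : List Int) (seen : List Int) (i : Int) : List Int × List Int × Int :=
  match PySem.List.pyGet? input_l i with
  | none => (input_l, seen, i)          -- Python raises IndexError here (outside Pre_)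
  | some op0 =>
    let op := performOpWhileA op0
    if op = 0 then
      (input_l, PySem.List.pySetD seen i 1, i)
    else if op > 0 then
      let plus := if op ≥ 5000 then PySem.Int.floordiv op 5000 else 0
      let op := if op ≥ 5000 then PySem.Int.mod op 5000 + plus else op
      if op + i ≥ (input_l.length : Int) then
        -- wrap around
        let begining_index := op - ((input_l.length : Int) - i - 1)
        match PySem.List.pop? input_l i, PySem.List.pop? seen i with
        | some (el, l'), some (_, s') =>
          (PySem.List.insert l' begining_index el, PySem.List.insert s' begining_index 1, i)
        | _, _ => (input_l, seen, i)    -- Python raises IndexError here (outside Pre_)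
      else
        match PySem.List.pop? input_l i, PySem.List.pop? seen i with
        | some (el, l'), some (_, s') =>
          (PySem.List.insert l' (op + i) el, PySem.List.insert s' (op + i) 1, i)
        | _, _ => (input_l, seen, i)
    else
      -- negatives
      if op + i ≤ 0 then
        -- wrap around
        let end_index := op + i
        match PySem.List.pop? input_l i, PySem.List.pop? seen i with
        | some (el, l'), some (_, s') =>
          if end_index = 0 then
            (PySem.List.insert l' (l'.length : Int) el, PySem.List.insert s' (l'.length : Int) 1, i)
          else
            (PySem.List.insert l' end_index el, PySem.List.insert s' end_index 1, i)
        | _, _ => (input_l, seen, i)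
      else
        match PySem.List.pop? input_l i, PySem.List.pop? seen i with
        | some (el, l'), some (_, s') =>
          (PySem.List.insert l' (i + op) el, PySem.List.insert s' (i + op) 1, i)
        | _, _ => (input_l, seen, i)

-- ===== PORT B =====
def perform_op_alt (input_l : List Int) (seen : List Int) (i : Int) : List Int × List Int × Int :=
  (PySem.List.pyGet? input_l i).elim (input_l, seen, i) (fun op0 =>   -- Python raises IndexError on none (outside Pre_)
    let op := if op0 ≤ -5000
      then op0 + 4999 * (PySem.Int.floordiv (-5000 - op0) 4999 + 1)
      else op0
    if op = 0 then
      (input_l, PySem.List.pySetD seen i 1, i)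
    else
      let op := if op ≥ 5000 then PySem.Int.mod op 5000 + PySem.Int.floordiv op 5000 else op
      let n : Int := (input_l.length : Int)
      let dest := if op > 0 ∧ op + i ≥ n then op + i + 1 - n
                  else if op < 0 ∧ op + i = 0 then n - 1
                  else op + i
      (((PySem.List.pop? input_l i).bind fun p =>
          (PySem.List.pop? seen i).map fun q =>
            (PySem.List.insert p.2 dest p.1, PySem.List.insert q.2 dest 1, i)).getD
        (input_l, seen, i)))

-- ===== PRECONDITION & SPEC =====
-- Pre_ excludes exactly the inputs where Python A raises IndexError: i must be a
-- valid (possibly negative) Python index into both input_l and seen.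
def Pre_perform_op (input_l : List Int) (seen : List Int) (i : Int) : Prop :=
  PySem.Raise.InRange input_l.length i ∧ PySem.Raise.InRange seen.length i
instance (input_l : List Int) (seen : List Int) (i : Int) : Decidable (Pre_perform_op input_l seen i) := by unfold Pre_perform_op; infer_instance
def pvWitness_perform_op : List Int × List Int × Int := ([3, -7000, 2, 0], [0, 0, 0, 0], 1)

def Spec_perform_op (input_l : List Int) (seen : List Int) (i : Int) (out : List Int × List Int × Int) : Prop := out = perform_op_alt input_l seen i
instance (input_l : List Int) (seen : List Int) (i : Int) (out : List Int × List Int × Int) : Decidable (Spec_perform_op input_l seen i out) := by unfold Spec_perform_op; infer_instance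

-- ===== CLAIM (what is proved, stated in full; the proofs are below) =====
def Claim_equal_perform_op : Prop := ∀ (input_l : List Int) (seen : List Int) (i : Int), Dom_perform_op input_l seen i → Pre_perform_op input_l seen i → Spec_perform_op input_l seen i (perform_op input_l seen i)

-- ===== LEMMAS AND PROOFS =====

-- closed form of A's while loop
theorem performOpWhileA_eq (op : Int) :
    performOpWhileA op =
      (if op ≤ -5000 then op + 4999 * (PySem.Int.floordiv (-5000 - op) 4999 + 1) else op) := by
  induction op using performOpWhileA.induct with
  | case1 op h ih =>
    rw [performOpWhileA, if_pos h, ih]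
    rw [PySem.Int.floordiv_eq_ediv_of_pos (by norm_num), PySem.Int.floordiv_eq_ediv_of_pos (by norm_num)] at *
    split_ifs at * <;> omega
  | case2 op h =>
    rw [performOpWhileA, if_neg h, if_neg h]

theorem pop?_some_of_inRange {α : Type} (xs : List α) (i : Int) (h : PySem.Raise.InRange xs.length i) :
    ∃ el l', PySem.List.pop? xs i = some (el, l') ∧ l'.length + 1 = xs.length := by
  obtain ⟨h1, h2⟩ := h
  simp only [PySem.List.pop?, PySem.List.pyIdx?]
  by_cases ha : 0 ≤ i
  · have hk : i.toNat < xs.length := by omega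
    refine ⟨xs[i.toNat], xs.eraseIdx i.toNat, ?_, ?_⟩
    · simp [ha, h2, List.getElem?_eq_getElem hk, hk]
    · rw [List.length_eraseIdx]; split_ifs
      all_goals omega
  · have hk : xs.length - (-i).toNat < xs.length := by omega
    refine ⟨xs[xs.length - (-i).toNat], xs.eraseIdx (xs.length - (-i).toNat), ?_, ?_⟩
    · simp [ha, h1, List.getElem?_eq_getElem hk]
    · rw [List.length_eraseIdx]; split_ifs
      all_goals omega

theorem perform_op_spec : Claim_equal_perform_op := by
  intro input_l seen i _ hpre
  obtain ⟨hl, hs⟩ := hpre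
  obtain ⟨el, l', hpl, hll⟩ := pop?_some_of_inRange input_l i hl
  obtain ⟨e2, s', hps, hsl⟩ := pop?_some_of_inRange seen i hs
  unfold Spec_perform_op perform_op perform_op_alt
  cases hg : PySem.List.pyGet? input_l i with
  | none => rfl
  | some op0 =>
  have hfd : ∀ a : Int, PySem.Int.floordiv a 4999 = a / 4999 := fun a => PySem.Int.floordiv_eq_ediv_of_pos (by norm_num)
  have hfd5 : ∀ a : Int, PySem.Int.floordiv a 5000 = a / 5000 := fun a => PySem.Int.floordiv_eq_ediv_of_pos (by norm_num)
  have hmd5 : ∀ a : Int, PySem.Int.mod a 5000 = a % 5000 := fun a => PySem.Int.mod_eq_emod_of_pos (by norm_num)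
  simp only [hpl, hps, performOpWhileA_eq, hfd, hfd5, hmd5, Option.elim, Option.bind, Option.map, Option.getD]
  have hlen : (l'.length : Int) = (input_l.length : Int) - 1 := by omega
  generalize (if op0 ≤ -5000 then op0 + 4999 * ((-5000 - op0) / 4999 + 1) else op0) = w
  split_ifs <;>
    first
      | rfl
      | omega
      | (simp only [Prod.mk.injEq]
         and_intros <;> first | trivial | (congr 1 <;> first | rfl | omega))
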